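-- pv_equiv track=rewrite | github.com/MegaGiciorPortas/WDI-Zadania | 02-tablice_jednowymiarowe/2.79.py | func
-- ===== SOURCE A (Python) =====
-- def func(T):
--     if len(T) == 0:
--         return False
--     if len(T) == 1:
--         return True
--
--     min_el = T[0]
--     max_el = T[0]
--
--     for i in range(1, len(T)):
--         if T[i] < min_el:
--             min_el = T[i]
--         elif T[i] > max_el:
--             max_el = T[i]
--
--     if max_el == min_el:
--         return False
--
--     licznik_min = 0
--     licznik_max = 0
--     for x in T:
--         if x == min_el:
--             licznik_min += 1
--         elif x == max_el:
--             licznik_max += 1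
--     return licznik_min == 1 == licznik_max
-- ===== SOURCE B (Python) =====
-- def func(T):
--     if len(T) == 0:
--         return False
--     if len(T) == 1:
--         return True
--     S = sorted(T)
--     return S[0] != S[1] and S[-1] != S[-2]
-- ===== Notes on version B (the rewrite author's own statement) =====
-- stated objective: simpler
-- what changed: Replaces the two linear passes (elif min/max scan, then an elif counting loop with a separate all-equal guard) by sorting a copy and comparing the two endpoint pairs of the sorted list.
import Mathlib
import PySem

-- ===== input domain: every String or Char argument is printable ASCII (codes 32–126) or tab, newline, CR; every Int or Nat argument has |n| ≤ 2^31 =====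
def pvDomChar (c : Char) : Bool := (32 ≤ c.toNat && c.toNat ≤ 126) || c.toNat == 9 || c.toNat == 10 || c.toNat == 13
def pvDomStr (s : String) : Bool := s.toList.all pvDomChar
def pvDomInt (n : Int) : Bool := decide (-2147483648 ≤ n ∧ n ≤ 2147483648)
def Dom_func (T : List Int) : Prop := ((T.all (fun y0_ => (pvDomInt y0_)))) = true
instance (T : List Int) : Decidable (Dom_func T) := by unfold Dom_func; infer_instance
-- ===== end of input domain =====

-- B replaces A's two elif-scan passes (min/max scan, then counting) by sorting a copy and
-- comparing the two endpoint pairs of the sorted list; objective: simpler.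


-- ===== PORT A =====
def func (T : List Int) : Bool :=
  if T.length = 0 then false
  else if T.length = 1 then true
  else
    let t0 := PySem.List.pyGetD T 0 0
    let mm : Int × Int :=
      (PySem.List.pyRange 1 (PySem.List.len T)).foldl
        (fun p i =>
          let x := PySem.List.pyGetD T i 0
          if x < p.1 then (x, p.2)
          else if x > p.2 then (p.1, x)
          else p)
        (t0, t0)
    if mm.2 = mm.1 then false
    else
      let c : Int × Int :=
        T.foldl
          (fun c x =>
            if x = mm.1 then (c.1 + 1, c.2)
            else if x = mm.2 then (c.1, c.2 + 1)
            else c)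
          (0, 0)
      decide (c.1 = 1 ∧ (1 : Int) = c.2)

-- ===== PORT B =====
def func_alt (T : List Int) : Bool :=
  if T.length = 0 then false
  else if T.length = 1 then true
  else
    let S := PySem.List.sorted T (fun x => x)
    (PySem.List.pyGetD S 0 0 != PySem.List.pyGetD S 1 0) &&
    (PySem.List.pyGetD S (-1) 0 != PySem.List.pyGetD S (-2) 0)

-- ===== PRECONDITION & SPEC =====
def Spec_func (T : List Int) (out : Bool) : Prop := out = func_alt T
instance (T : List Int) (out : Bool) : Decidable (Spec_func T out) := by unfold Spec_func; infer_instance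

-- ===== CLAIM (what is proved, stated in full; the proofs are below) =====
def Claim_equal_func : Prop := ∀ (T : List Int), Dom_func T → Spec_func T (func T)

-- ===== LEMMAS AND PROOFS =====

-- A's first pass computes (fold of min, fold of max) as long as the accumulator stays ordered.
theorem scan_eq_minmax (l : List Int) (p : Int × Int) (h : p.1 ≤ p.2) :
    l.foldl
      (fun p x =>
        if x < p.1 then (x, p.2)
        else if x > p.2 then (p.1, x)
        else p) p
    = (l.foldl min p.1, l.foldl max p.2) := by
  induction l generalizing p with
  | nil => rfl
  | cons x t ih =>
      simp only [List.foldl_cons]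
      by_cases h1 : x < p.1
      · simp only [if_pos h1]
        rw [ih (x, p.2) (by dsimp; omega)]
        have : min p.1 x = x := by omega
        have h2 : max p.2 x = p.2 := by omega
        simp [this, h2]
      · simp only [if_neg h1]
        by_cases h2 : x > p.2
        · simp only [if_pos h2]
          rw [ih (p.1, x) (by dsimp; omega)]
          have : min p.1 x = p.1 := by omega
          have h3 : max p.2 x = x := by omega
          simp [this, h3]
        · simp only [if_neg h2]
          rw [ih p h]
          have : min p.1 x = p.1 := by omega
          have h3 : max p.2 x = p.2 := by omega
          simp [this, h3]

-- A's second pass counts occurrences of mn and mx when they differ.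
theorem count_pass (l : List Int) (mn mx : Int) (hne : mn ≠ mx) (c : Int × Int) :
    l.foldl
      (fun c x =>
        if x = mn then (c.1 + 1, c.2)
        else if x = mx then (c.1, c.2 + 1)
        else c) c
    = (c.1 + (l.count mn : Int), c.2 + (l.count mx : Int)) := by
  induction l generalizing c with
  | nil => simp
  | cons x t ih =>
      simp only [List.foldl_cons]
      by_cases h1 : x = mn
      · subst h1
        rw [if_pos rfl, ih]
        refine Prod.ext ?_ ?_ <;> simp [hne] <;> omega
      · rw [if_neg h1]
        by_cases h2 : x = mx
        · subst h2
          rw [if_pos rfl, ih]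
          refine Prod.ext ?_ ?_ <;> simp [h1] <;> omega
        · rw [if_neg h2, ih]
          refine Prod.ext ?_ ?_ <;> simp [h1, h2]

theorem foldl_min_mem (l : List Int) (a : Int) : l.foldl min a ∈ a :: l := by
  induction l generalizing a with
  | nil => simp
  | cons x t ih =>
      simp only [List.foldl_cons]
      have := ih (min a x)
      rcases List.mem_cons.1 this with h | h
      · rw [h]
        rcases min_cases a x with ⟨h1, _⟩ | ⟨h1, _⟩ <;> simp [h1]
      · simp [h]

theorem foldl_min_le (l : List Int) (a : Int) : ∀ x ∈ a :: l, l.foldl min a ≤ x := by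
  induction l generalizing a with
  | nil => simp
  | cons y t ih =>
      intro x hx
      simp only [List.foldl_cons]
      have hkey : t.foldl min (min a y) ≤ min a y := ih (min a y) (min a y) (by simp)
      rcases List.mem_cons.1 hx with rfl | h'
      · exact hkey.trans (min_le_left _ _)
      · rcases List.mem_cons.1 h' with rfl | h''
        · exact hkey.trans (min_le_right _ _)
        · exact ih _ _ (by simp [h''])

theorem foldl_max_mem (l : List Int) (a : Int) : l.foldl max a ∈ a :: l := by
  induction l generalizing a with
  | nil => simp
  | cons x t ih =>
      simp only [List.foldl_cons]
      have := ih (max a x)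
      rcases List.mem_cons.1 this with h | h
      · rw [h]
        rcases max_cases a x with ⟨h1, _⟩ | ⟨h1, _⟩ <;> simp [h1]
      · simp [h]

theorem foldl_le_max (l : List Int) (a : Int) : ∀ x ∈ a :: l, x ≤ l.foldl max a := by
  induction l generalizing a with
  | nil => simp
  | cons y t ih =>
      intro x hx
      simp only [List.foldl_cons]
      have hkey : max a y ≤ t.foldl max (max a y) := ih (max a y) (max a y) (by simp)
      rcases List.mem_cons.1 hx with rfl | h'
      · exact (le_max_left _ _).trans hkey
      · rcases List.mem_cons.1 h' with rfl | h''
        · exact (le_max_right _ _).trans hkey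
        · exact ih _ _ (by simp [h''])

-- In a ≤-sorted list of length ≥ 2, the head is unique iff it differs from the second element.
theorem count_head_eq_one_iff (R : Int → Int → Prop)
    (htr : ∀ a b c : Int, R a b → R b c → a ≠ b → a ≠ c)
    (s0 s1 : Int) (r : List Int) (hp : (s0 :: s1 :: r).Pairwise R) :
    ((s0 :: s1 :: r).count s0 = 1 ↔ s0 ≠ s1) := by
  rcases List.pairwise_cons.1 hp with ⟨h0, hp1⟩
  rcases List.pairwise_cons.1 hp1 with ⟨h1, _⟩
  constructor
  · intro hc h01
    subst h01
    simp at hc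
  · intro hne
    have h01 : R s0 s1 := h0 s1 (by simp)
    have hnot : s0 ∉ s1 :: r := by
      intro hmem
      rcases List.mem_cons.1 hmem with h | h
      · exact hne h
      · exact htr s0 s1 s0 h01 (h1 s0 h) hne rfl
    simp [List.count_eq_zero.2 hnot]

theorem htr_le : ∀ a b c : Int, a ≤ b → b ≤ c → a ≠ b → a ≠ c := by
  intro a b c h1 h2 h3; omega

theorem htr_ge : ∀ a b c : Int, b ≤ a → c ≤ b → a ≠ b → a ≠ c := by
  intro a b c h1 h2 h3; omega

-- ===== VERDICT (by name: the statement is the Claim_ definition above) =====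
theorem func_spec : Claim_equal_func := by
  intro T _
  unfold Spec_func func func_alt
  rcases T with _ | ⟨a, T1⟩
  · simp
  rcases T1 with _ | ⟨b, T2⟩
  · simp
  set T : List Int := a :: b :: T2 with hT
  have hlen2 : 2 ≤ T.length := by simp [hT]
  have h0 : ¬ T.length = 0 := by rw [hT]; simp
  have h1 : ¬ T.length = 1 := by rw [hT]; simp
  rw [if_neg h0, if_neg h1, if_neg h0, if_neg h1]
  have hget0 : PySem.List.pyGetD T 0 0 = a := by simp [hT, PySem.List.pyGetD_zero_cons]
  dsimp only
  rw [hget0]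
  -- first pass
  have hrange : (PySem.List.pyRange 1 (PySem.List.len T)).foldl
      (fun (p : Int × Int) i =>
        if PySem.List.pyGetD T i 0 < p.1 then (PySem.List.pyGetD T i 0, p.2)
        else if PySem.List.pyGetD T i 0 > p.2 then (p.1, PySem.List.pyGetD T i 0) else p)
      ((a : Int), (a : Int))
      = (T.tail.foldl (fun (p : Int × Int) x =>
          if x < p.1 then (x, p.2) else if x > p.2 then (p.1, x) else p) (a, a)) := by
    have := PySem.List.foldl_pyRange_pyGetD T 0
      (fun (p : Int × Int) x =>
        if x < p.1 then (x, p.2) else if x > p.2 then (p.1, x) else p) ((a : Int), a)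
      (a := 1) (by omega)
    simpa [List.drop_one] using this
  rw [hrange, scan_eq_minmax _ _ (le_refl a)]
  dsimp only
  set mn := T.tail.foldl min a with hmn
  set mx := T.tail.foldl max a with hmx
  have hTtail : a :: T.tail = T := by simp [hT]
  have hmn_mem : mn ∈ T := by rw [← hTtail]; exact foldl_min_mem _ _
  have hmn_le : ∀ x ∈ T, mn ≤ x := by rw [← hTtail]; exact foldl_min_le _ _
  have hmx_mem : mx ∈ T := by rw [← hTtail]; exact foldl_max_mem _ _
  have hle_mx : ∀ x ∈ T, x ≤ mx := by rw [← hTtail]; exact foldl_le_max _ _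
  -- sorted list
  set S := PySem.List.sorted T (fun x => x) with hS
  have hperm : S.Perm T := PySem.List.sorted_perm T _ _
  have hSlen : S.length = T.length := hperm.length_eq
  have hSpair : S.Pairwise (fun x y : Int => x ≤ y) := by
    simpa using PySem.List.sorted_pairwise T (fun x : Int => x)
  rcases S with _ | ⟨s0, S1⟩
  · simp at hSlen; omega
  rcases S1 with _ | ⟨s1, S2⟩
  · simp at hSlen; omega
  set S : List Int := s0 :: s1 :: S2 with hSdef
  -- endpoints: write S as P ++ [u, v] via its reverse
  have hSlen2 : 2 ≤ S.length := by simp [hSdef]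
  obtain ⟨v, u, R, hrev⟩ : ∃ v u R, S.reverse = v :: u :: R := by
    rcases hr : S.reverse with _ | ⟨v, _ | ⟨u, R⟩⟩
    · exfalso; have := congrArg List.length hr; simp [hSdef] at this
    · exfalso; have := congrArg List.length hr; simp [hSdef] at this
    · exact ⟨v, u, R, rfl⟩
  have hPS : S = R.reverse ++ [u, v] := by
    have := congrArg List.reverse hrev
    simpa using this
  -- identify mn with s0 and mx with v
  have hs0_mem : s0 ∈ T := hperm.mem_iff.1 (by simp [hSdef])
  have hs0_le : ∀ y ∈ T, s0 ≤ y := by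
    intro y hy
    have hy' : y ∈ S := hperm.mem_iff.2 hy
    rcases List.mem_cons.1 hy' with h | h
    · omega
    · exact (List.pairwise_cons.1 hSpair).1 y h
  have hmn_s0 : mn = s0 := le_antisymm (hmn_le s0 hs0_mem) (hs0_le mn hmn_mem)
  have hv_mem : v ∈ T := hperm.mem_iff.1 (by rw [hPS]; simp)
  have hRpair : S.reverse.Pairwise (fun x y : Int => y ≤ x) := List.pairwise_reverse.2 hSpair
  rw [hrev] at hRpair
  have hle_v : ∀ y ∈ T, y ≤ v := by
    intro y hy
    have hy' : y ∈ S.reverse := by simpa using hperm.mem_iff.2 hy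
    rw [hrev] at hy'
    rcases List.mem_cons.1 hy' with h | h
    · omega
    · exact (List.pairwise_cons.1 hRpair).1 y h
  have hmx_v : mx = v := le_antisymm (hle_v mx hmx_mem) (hle_mx v hv_mem)
  -- pyGetD values of B
  have hg0 : PySem.List.pyGetD S 0 0 = s0 := by simp [hSdef, PySem.List.pyGetD_zero_cons]
  have hg1 : PySem.List.pyGetD S 1 0 = s1 := by
    have : PySem.List.pyGetD S ((1 : Nat) : Int) 0 = S.getD 1 0 := PySem.List.pyGetD_natCast S 1 0
    simpa [hSdef] using this
  have hgm1 : PySem.List.pyGetD S (-1) 0 = v := by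
    have hsplit : R.reverse ++ [u, v] = (R.reverse ++ [u]) ++ [v] := by simp
    rw [hPS, hsplit, PySem.List.pyGetD_neg_one_append_singleton]
  have hgm2 : PySem.List.pyGetD S (-2) 0 = u := by
    rw [hPS, PySem.List.pyGetD_neg_ofNat _ 2 0 (by omega) (by simp)]
    simp
  rw [hg0, hg1, hgm1, hgm2]
  -- count characterisations
  have hcount_s0 : (S.count s0 = 1 ↔ s0 ≠ s1) :=
    count_head_eq_one_iff _ htr_le s0 s1 S2 (by simpa [hSdef] using hSpair)
  have hcount_v : (S.reverse.count v = 1 ↔ v ≠ u) := by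
    rw [hrev]
    exact count_head_eq_one_iff _ htr_ge v u R hRpair
  by_cases heq : mx = mn
  · -- all elements equal: s0 = s1, B's first conjunct is false
    rw [if_pos heq]
    have hs01 : s0 = s1 := by
      have hs1T : s1 ∈ T := hperm.mem_iff.1 (by simp [hSdef])
      have h1 := hmn_le s1 hs1T
      have h2 := hle_mx s1 hs1T
      have h3 := hmn_le s0 hs0_mem
      have h4 := hle_mx s0 hs0_mem
      omega
    simp [hs01]
  · rw [if_neg heq]
    rw [count_pass T mn mx (fun h => heq h.symm) (0, 0)]
    have hcT_s0 : T.count s0 = S.count s0 := (hperm.count_eq s0).symm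
    have hcT_v : T.count v = S.reverse.count v := by
      rw [← hperm.count_eq v]; simp
    simp only [hmn_s0, hmx_v, zero_add]
    rw [Bool.eq_iff_iff]
    simp only [decide_eq_true_iff, Bool.and_eq_true, bne_iff_ne, ne_eq]
    rw [hcT_s0, hcT_v]
    constructor
    · rintro ⟨e1, e2⟩
      exact ⟨hcount_s0.1 (by omega), hcount_v.1 (by omega)⟩
    · rintro ⟨n1, n2⟩
      have c1 := hcount_s0.2 n1
      have c2 := hcount_v.2 n2
      omega
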